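-- pv_equiv track=rewrite | github.com/adiseal/edabit-practices | Is It the Same Upside Down.py | same_upsidedown
-- ===== SOURCE A (Python) =====
-- def same_upsidedown(s):
--     # Create a mapping for the digits when turned upside down
--     upside_down_mapping = {'0': '0', '6': '9', '9': '6'}
--
--     # Generate the upside down version of the string
--     upside_down = []
--
--     for char in reversed(s):
--         if char in upside_down_mapping:
--             upside_down.append(upside_down_mapping[char])
--         else:
--             return False  # If there are any invalid characters
--
--     # Join the list to form the final upside down string
--     upside_down_str = ''.join(upside_down)
--
--     # Check if the original string is the same as the upside down version
--     return upside_down_str == s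
-- ===== SOURCE B (Python) =====
-- def same_upsidedown(s):
--     # In-place paired scan: compare s[i] with the flip of s[n-1-i]; no reversed
--     # string is ever built or joined.
--     flip = {'0': '0', '6': '9', '9': '6'}
--     for a, b in zip(s, reversed(s)):
--         m = flip.get(b)
--         if m is None or m != a:
--             return False
--     return True
-- ===== Notes on version B (the rewrite author's own statement) =====
-- stated objective: simpler
-- what changed: B never builds/joins the reversed mapped string; it walks the string once, pairing each position with its mirror position and comparing in place with early exit.
import Mathlib
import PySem

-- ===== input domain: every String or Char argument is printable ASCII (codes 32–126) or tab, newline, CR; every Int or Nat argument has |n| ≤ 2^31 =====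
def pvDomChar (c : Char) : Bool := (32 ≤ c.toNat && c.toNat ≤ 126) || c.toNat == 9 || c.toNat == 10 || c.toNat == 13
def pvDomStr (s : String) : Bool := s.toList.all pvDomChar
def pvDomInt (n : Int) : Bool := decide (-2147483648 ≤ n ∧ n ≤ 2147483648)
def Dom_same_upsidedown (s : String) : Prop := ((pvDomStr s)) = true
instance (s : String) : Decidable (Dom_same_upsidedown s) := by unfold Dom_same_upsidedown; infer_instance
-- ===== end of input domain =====

-- B compares each position with the flip of its mirror position in one in-place
-- paired scan, never building or joining the reversed mapped string (objective: simpler).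

-- the upside-down digit mapping, shared data of both programs (each Python defines the same dict literal)
def pvFlipMap : PySem.Dict Char Char := PySem.Dict.ofList [('0', '0'), ('6', '9'), ('9', '6')]

-- ===== PORT A =====
-- the loop "for char in reversed(s): append mapping[char] / return False":
-- builds the mapped list of the reversed characters, none = early `return False`
def pvA_build : List Char → Option (List Char)
  | [] => some []
  | c :: rest =>
    match pvFlipMap.get? c with
    | none => none
    | some m => (pvA_build rest).map (fun u => m :: u)

def same_upsidedown (s : String) : Bool :=
  match pvA_build s.toList.reverse with
  | none => false
  | some u => decide (u = s.toList)   -- ''.join(upside_down) == s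

-- ===== PORT B =====
-- the loop "for a, b in zip(s, reversed(s)): …" with early `return False`
def pvB_loop : List (Char × Char) → Bool
  | [] => true
  | (a, b) :: rest =>
    match pvFlipMap.get? b with
    | none => false
    | some m => if m == a then pvB_loop rest else false

def same_upsidedown_alt (s : String) : Bool :=
  pvB_loop (s.toList.zip s.toList.reverse)

-- ===== PRECONDITION & SPEC =====
def Spec_same_upsidedown (s : String) (out : Bool) : Prop := out = same_upsidedown_alt s
instance (s : String) (out : Bool) : Decidable (Spec_same_upsidedown s out) := by unfold Spec_same_upsidedown; infer_instance

-- ===== CLAIM (what is proved, stated in full; the proofs are below) =====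
def Claim_equal_same_upsidedown : Prop := ∀ (s : String), Dom_same_upsidedown s → Spec_same_upsidedown s (same_upsidedown s)

-- ===== LEMMAS AND PROOFS =====

-- proof-only abstractions of the mapping
def pvValid (c : Char) : Bool := (pvFlipMap.get? c).isSome
def pvFlipT (c : Char) : Char := (pvFlipMap.get? c).getD c

-- A's builder succeeds iff every char is mapped, and then returns the mapped list
theorem pvA_build_eq (m : List Char) :
    pvA_build m = if m.all pvValid then some (m.map pvFlipT) else none := by
  induction m with
  | nil => simp [pvA_build]
  | cons c rest ih =>
    cases h : pvFlipMap.get? c with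
    | none =>
      simp [pvA_build, h, pvValid]
    | some v =>
      simp only [pvA_build, ih, List.all_cons, List.map_cons, pvValid, pvFlipT, h,
        Option.isSome_some, Bool.true_and, Option.getD_some]
      split_ifs <;> simp

-- B's loop is an `all` over the zipped pairs
theorem pvB_loop_eq (zs : List (Char × Char)) :
    pvB_loop zs = zs.all (fun p => pvValid p.2 && (pvFlipT p.2 == p.1)) := by
  induction zs with
  | nil => rfl
  | cons p rest ih =>
    obtain ⟨a, b⟩ := p
    cases h : pvFlipMap.get? b with
    | none => simp [pvB_loop, h, pvValid]
    | some v =>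
      simp only [pvB_loop, ih, List.all_cons, pvValid, pvFlipT, h, Option.isSome_some,
        Option.getD_some, Bool.true_and]
      split_ifs <;> simp_all

-- the paired-scan test over equal-length lists equals "all mapped ∧ mapped mirror = original"
theorem pvZip_all_eq (l m : List Char) (h : l.length = m.length) :
    (l.zip m).all (fun p => pvValid p.2 && (pvFlipT p.2 == p.1))
      = (m.all pvValid && decide (m.map pvFlipT = l)) := by
  induction l generalizing m with
  | nil =>
    cases m with
    | nil => simp
    | cons b m => simp at h
  | cons a l ih =>
    cases m with
    | nil => simp at h
    | cons b m =>
      simp only [List.length_cons, Nat.succ_inj] at h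
      simp only [List.zip_cons_cons, List.all_cons, ih m h, List.map_cons]
      simp [List.cons.injEq, beq_eq_decide, Bool.and_left_comm, Bool.and_assoc]

-- ===== VERDICT (by name: the statement is the Claim_ definition above) =====
theorem same_upsidedown_spec : Claim_equal_same_upsidedown := by
  intro s _
  unfold Spec_same_upsidedown same_upsidedown same_upsidedown_alt
  rw [pvB_loop_eq, pvZip_all_eq _ _ (by simp), pvA_build_eq]
  cases hv : (s.toList.reverse).all pvValid with
  | false => simp
  | true => simp
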